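-- pv_equiv track=rewrite | github.com/Hypatia-Energy-Modelling-Framework/Hypatia | hypatia/utility/constants.py | take_regional_sheets
-- ===== SOURCE A (Python) =====
-- storage_sheets = ["Storage_initial_SOC","Storage_min_SOC",
-- "Storage_charge_efficiency","Storage_discharge_efficiency",
-- "Storage_charge_time","Storage_discharge_time"]
--
-- conversion_plus_sheets = ["Carrier_ratio_in","Carrier_ratio_out"]
--
-- def take_regional_sheets(mode,technologies,regions):
--     regional_sheets = {}
--     for reg in regions:
--
--         if mode == "Operation":
--
--             regional_sheets[reg] = ["V_OM","F_OM","Tech_efficiency",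
--             "AnnualProd_perunit_capacity","Residual_capacity",
--             "Capacity_factor_tech","capacity_factor_resource",
--             "Specific_emission","Fix_taxsub","Carbon_tax",
--             "Min_production","Max_production","Min_production_h",
--             "Max_production_h","Emission_cap_annual","Demand"]
--
--             position1_operation = regional_sheets[reg].index("Tech_efficiency")
--
--
--             if "Conversion_plus" in technologies[reg].keys():
--                 for sheet, item in enumerate(conversion_plus_sheets):
--                     regional_sheets[reg].insert(sheet + position1_operation+1, item)
--             position2_operation = regional_sheets[reg].index("capacity_factor_resource")
--
--             if "Storage" in technologies[reg].keys():
--                 for sheet,item in enumerate(storage_sheets):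
--                     regional_sheets[reg].insert(sheet + position2_operation+1, item)
--
--         if mode == "Planning":
--
--             regional_sheets[reg] = ["V_OM","F_OM","INV","Decom_cost",
--             "Economic_lifetime","Interest_rate","Discount_rate","Tech_lifetime",
--             "Tech_efficiency","AnnualProd_perunit_capacity","Residual_capacity",
--             "Capacity_factor_tech","capacity_factor_resource","Specific_emission",
--             "Investment_taxsub","Fix_taxsub", "Carbon_tax","Min_newcap",
--             "Max_newcap","Min_totalcap","Max_totalcap","Min_production",
--             "Max_production","Min_production_h","Max_production_h",
--             "Emission_cap_annual","Demand"]
--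
--             position1_planning = regional_sheets[reg].index("Tech_efficiency")
--
--
--             if "Conversion_plus" in technologies[reg].keys():
--                 for sheet, item in enumerate(conversion_plus_sheets):
--                     regional_sheets[reg].insert(sheet + position1_planning+1, item)
--
--             position2_planning= regional_sheets[reg].index("capacity_factor_resource")
--
--             if "Storage" in technologies[reg].keys():
--                 for sheet,item in enumerate(storage_sheets):
--                     regional_sheets[reg].insert(sheet + position2_planning+1, item)
--
--     return regional_sheets
-- ===== SOURCE B (Python) =====
-- storage_sheets = ["Storage_initial_SOC","Storage_min_SOC",
-- "Storage_charge_efficiency","Storage_discharge_efficiency",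
-- "Storage_charge_time","Storage_discharge_time"]
--
-- conversion_plus_sheets = ["Carrier_ratio_in","Carrier_ratio_out"]
--
-- OPERATION_SHEETS = ["V_OM","F_OM","Tech_efficiency",
-- "AnnualProd_perunit_capacity","Residual_capacity",
-- "Capacity_factor_tech","capacity_factor_resource",
-- "Specific_emission","Fix_taxsub","Carbon_tax",
-- "Min_production","Max_production","Min_production_h",
-- "Max_production_h","Emission_cap_annual","Demand"]
--
-- PLANNING_SHEETS = ["V_OM","F_OM","INV","Decom_cost",
-- "Economic_lifetime","Interest_rate","Discount_rate","Tech_lifetime",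
-- "Tech_efficiency","AnnualProd_perunit_capacity","Residual_capacity",
-- "Capacity_factor_tech","capacity_factor_resource","Specific_emission",
-- "Investment_taxsub","Fix_taxsub", "Carbon_tax","Min_newcap",
-- "Max_newcap","Min_totalcap","Max_totalcap","Min_production",
-- "Max_production","Min_production_h","Max_production_h",
-- "Emission_cap_annual","Demand"]
--
-- def _row(template, keys):
--     row = []
--     for name in template:
--         row.append(name)
--         if name == "Tech_efficiency" and "Conversion_plus" in keys:
--             row.extend(conversion_plus_sheets)
--         if name == "capacity_factor_resource" and "Storage" in keys:
--             row.extend(storage_sheets)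
--     return row
--
-- def take_regional_sheets(mode, technologies, regions):
--     if mode == "Operation":
--         template = OPERATION_SHEETS
--     elif mode == "Planning":
--         template = PLANNING_SHEETS
--     else:
--         return {}
--     return {reg: _row(template, technologies[reg].keys()) for reg in regions}
-- ===== Notes on version B (the rewrite author's own statement) =====
-- stated objective: simpler
-- what changed: Replaces the per-region base-list + .index() + enumerate/.insert() splicing with fixed module-level templates and a single interleaving pass that appends the extra sheet blocks right after their anchor names.
import Mathlib
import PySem

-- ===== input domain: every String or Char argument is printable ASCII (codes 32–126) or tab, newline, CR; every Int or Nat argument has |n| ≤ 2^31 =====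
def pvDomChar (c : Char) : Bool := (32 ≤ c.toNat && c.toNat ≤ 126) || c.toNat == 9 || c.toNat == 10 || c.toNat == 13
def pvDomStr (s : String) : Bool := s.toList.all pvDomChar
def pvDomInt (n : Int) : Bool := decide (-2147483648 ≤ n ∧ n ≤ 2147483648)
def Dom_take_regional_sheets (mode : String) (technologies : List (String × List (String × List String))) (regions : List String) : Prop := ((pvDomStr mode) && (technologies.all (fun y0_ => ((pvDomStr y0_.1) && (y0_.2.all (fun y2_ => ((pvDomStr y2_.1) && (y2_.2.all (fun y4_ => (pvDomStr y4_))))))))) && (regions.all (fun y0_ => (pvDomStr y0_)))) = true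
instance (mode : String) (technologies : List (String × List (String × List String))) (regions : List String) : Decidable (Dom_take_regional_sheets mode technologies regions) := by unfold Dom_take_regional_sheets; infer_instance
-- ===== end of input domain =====

-- B replaces A's base-list + .index() + insert() splicing with fixed templates and one
-- interleaving pass per region (objective: simpler).

-- ===== PORT A =====
def pvStorageSheets : List String := ["Storage_initial_SOC","Storage_min_SOC",
  "Storage_charge_efficiency","Storage_discharge_efficiency",
  "Storage_charge_time","Storage_discharge_time"]

def pvConvPlusSheets : List String := ["Carrier_ratio_in","Carrier_ratio_out"]

-- for sheet,item in enumerate(items): l.insert(sheet + pos + 1, item)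
def pvInsertLoop (pos : Int) (items : List String) (l : List String) : List String :=
  (PySem.List.enumerate items 0).foldl
    (fun acc si => PySem.List.insert acc (si.1 + pos + 1) si.2) l

-- the splice body shared verbatim by A's two mode branches (only the base list differs)
def pvSpliceA (base : List String) (keys : List String) : List String :=
  let l := base
  let p1 : Int := ((PySem.List.index? l "Tech_efficiency").getD 0 : Nat)
  let l := if keys.contains "Conversion_plus" then pvInsertLoop p1 pvConvPlusSheets l else l
  let p2 : Int := ((PySem.List.index? l "capacity_factor_resource").getD 0 : Nat)
  if keys.contains "Storage" then pvInsertLoop p2 pvStorageSheets l else l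

def pvOpBase : List String := ["V_OM","F_OM","Tech_efficiency",
  "AnnualProd_perunit_capacity","Residual_capacity",
  "Capacity_factor_tech","capacity_factor_resource",
  "Specific_emission","Fix_taxsub","Carbon_tax",
  "Min_production","Max_production","Min_production_h",
  "Max_production_h","Emission_cap_annual","Demand"]

def pvPlBase : List String := ["V_OM","F_OM","INV","Decom_cost",
  "Economic_lifetime","Interest_rate","Discount_rate","Tech_lifetime",
  "Tech_efficiency","AnnualProd_perunit_capacity","Residual_capacity",
  "Capacity_factor_tech","capacity_factor_resource","Specific_emission",
  "Investment_taxsub","Fix_taxsub","Carbon_tax","Min_newcap",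
  "Max_newcap","Min_totalcap","Max_totalcap","Min_production",
  "Max_production","Min_production_h","Max_production_h",
  "Emission_cap_annual","Demand"]

-- technologies[reg] raises KeyError in Python when reg is absent (outside Pre_); the port skips there
def take_regional_sheets (mode : String) (technologies : List (String × List (String × List String))) (regions : List String) : List (String × List String) :=
  (regions.foldl
    (fun (d : PySem.Dict String (List String)) reg =>
      let d := if mode == "Operation" then
          match technologies.lookup reg with
          | none => d
          | some t => d.insert reg (pvSpliceA pvOpBase (t.map Prod.fst))
        else d
      if mode == "Planning" then
          match technologies.lookup reg with
          | none => d
          | some t => d.insert reg (pvSpliceA pvPlBase (t.map Prod.fst))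
        else d)
    PySem.Dict.empty).items

-- ===== PORT B =====
-- one interleaving pass over the template
def pvRowB (template : List String) (keys : List String) : List String :=
  template.foldl
    (fun row name =>
      let row := row ++ [name]
      let row := if name == "Tech_efficiency" && keys.contains "Conversion_plus"
                 then row ++ pvConvPlusSheets else row
      if name == "capacity_factor_resource" && keys.contains "Storage"
      then row ++ pvStorageSheets else row) []

def take_regional_sheets_alt (mode : String) (technologies : List (String × List (String × List String))) (regions : List String) : List (String × List String) :=
  if mode == "Operation" ∨ mode == "Planning" then
    let template := if mode == "Operation" then pvOpBase else pvPlBase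
    (regions.foldl
      (fun (d : PySem.Dict String (List String)) reg =>
        match technologies.lookup reg with
        | none => d
        | some t => d.insert reg (pvRowB template (t.map Prod.fst)))
      PySem.Dict.empty).items
  else []

-- ===== PRECONDITION & SPEC =====
-- Pre_ excludes exactly the inputs on which Python A raises KeyError: mode "Operation" or
-- "Planning" with some region missing from technologies (B raises KeyError there too).
def Pre_take_regional_sheets (mode : String) (technologies : List (String × List (String × List String))) (regions : List String) : Prop :=
  (mode = "Operation" ∨ mode = "Planning") →
    ∀ reg ∈ regions, reg ∈ technologies.map Prod.fst

instance (mode : String) (technologies : List (String × List (String × List String))) (regions : List String) : Decidable (Pre_take_regional_sheets mode technologies regions) := by unfold Pre_take_regional_sheets; infer_instance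

def pvWitness_take_regional_sheets : String × (List (String × List (String × List String))) × List String :=
  ("Operation", [("R1", [("Storage", [])]), ("R2", [])], ["R1", "R2"])

def Spec_take_regional_sheets (mode : String) (technologies : List (String × List (String × List String))) (regions : List String) (out : List (String × List String)) : Prop := out = take_regional_sheets_alt mode technologies regions
instance (mode : String) (technologies : List (String × List (String × List String))) (regions : List String) (out : List (String × List String)) : Decidable (Spec_take_regional_sheets mode technologies regions out) := by unfold Spec_take_regional_sheets; infer_instance

-- ===== CLAIM (what is proved, stated in full; the proofs are below) =====
def Claim_equal_take_regional_sheets : Prop := ∀ (mode : String) (technologies : List (String × List (String × List String))) (regions : List String), Dom_take_regional_sheets mode technologies regions → Pre_take_regional_sheets mode technologies regions → Spec_take_regional_sheets mode technologies regions (take_regional_sheets mode technologies regions)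

-- ===== LEMMAS AND PROOFS =====

-- B's loop body, named for the proofs
def pvStep (keys : List String) (row : List String) (name : String) : List String :=
  let row := row ++ [name]
  let row := if name == "Tech_efficiency" && keys.contains "Conversion_plus"
             then row ++ pvConvPlusSheets else row
  if name == "capacity_factor_resource" && keys.contains "Storage"
  then row ++ pvStorageSheets else row

theorem pvRowB_eq_foldl (t keys : List String) : pvRowB t keys = t.foldl (pvStep keys) [] := rfl

def pvCList (c : Bool) : List String := if c then pvConvPlusSheets else []
def pvSList (s : Bool) : List String := if s then pvStorageSheets else []

-- template decompositions
def pvAOp : List String := ["V_OM","F_OM"]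
def pvMOp : List String := ["AnnualProd_perunit_capacity","Residual_capacity","Capacity_factor_tech"]
def pvZOp : List String := ["Specific_emission","Fix_taxsub","Carbon_tax",
  "Min_production","Max_production","Min_production_h",
  "Max_production_h","Emission_cap_annual","Demand"]
def pvAPl : List String := ["V_OM","F_OM","INV","Decom_cost",
  "Economic_lifetime","Interest_rate","Discount_rate","Tech_lifetime"]
def pvMPl : List String := ["AnnualProd_perunit_capacity","Residual_capacity","Capacity_factor_tech"]
def pvZPl : List String := ["Specific_emission",
  "Investment_taxsub","Fix_taxsub","Carbon_tax","Min_newcap",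
  "Max_newcap","Min_totalcap","Max_totalcap","Min_production",
  "Max_production","Min_production_h","Max_production_h",
  "Emission_cap_annual","Demand"]

-- the insert loop starting at enumerate-index s, inserting at s+pos+1, splices after pre
theorem pv_ins_loop (items : List String) : ∀ (s pos : Int) (pre suf : List String),
    s + pos + 1 = (pre.length : Int) →
    (PySem.List.enumerate items s).foldl
      (fun acc si => PySem.List.insert acc (si.1 + pos + 1) si.2) (pre ++ suf)
      = pre ++ items ++ suf := by
  induction items with
  | nil => intro s pos pre suf h; simp [PySem.List.enumerate_nil]
  | cons x xs ih =>
    intro s pos pre suf h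
    rw [PySem.List.enumerate_cons]
    simp only [List.foldl_cons]
    have hins : PySem.List.insert (pre ++ suf) (s + pos + 1) x = pre ++ x :: suf := by
      rw [h, PySem.List.insert_natCast (pre ++ suf) pre.length x (by simp)]
      simp
    rw [hins]
    have h2 : (s + 1) + pos + 1 = (((pre ++ [x]).length : Nat) : Int) := by
      simp; omega
    have := ih (s + 1) pos (pre ++ [x]) suf h2
    simpa using this

theorem pv_index_anchor (A r : List String) (v : String) (hv : v ∉ A) :
    PySem.List.index? (A ++ v :: r) v = some A.length := by
  have e : A ++ v :: r = (A ++ [v]) ++ r := by simp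
  rw [e, PySem.List.index?_append_of_mem r (by simp),
      PySem.List.index?_append_singleton_self A v hv]

-- one splice (index lookup + insert loop) after the unique anchor v
theorem pv_splice_one (items pre r : List String) (v : String) (hv : v ∉ pre) :
    pvInsertLoop (((PySem.List.index? (pre ++ v :: r) v).getD 0 : Nat) : Int) items (pre ++ v :: r)
      = pre ++ v :: items ++ r := by
  rw [pv_index_anchor pre r v hv]
  unfold pvInsertLoop
  have := pv_ins_loop items 0 ((pre.length : Nat) : Int) (pre ++ [v]) r
    (by simp [List.length_append])
  simpa using this

-- A's splice on a base split at its two (unique) anchors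
theorem pv_splice_char (keys A M Z : List String)
    (hteA : "Tech_efficiency" ∉ A)
    (hcfA : "capacity_factor_resource" ∉ A)
    (hcfM : "capacity_factor_resource" ∉ M) :
    pvSpliceA (A ++ "Tech_efficiency" :: M ++ "capacity_factor_resource" :: Z) keys
      = A ++ "Tech_efficiency" :: pvCList (keys.contains "Conversion_plus")
          ++ M ++ "capacity_factor_resource" :: pvSList (keys.contains "Storage") ++ Z := by
  have hcf1 : "capacity_factor_resource" ∉ A ++ ["Tech_efficiency"] ++ pvConvPlusSheets ++ M := by
    simp only [List.mem_append, not_or]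
    exact ⟨⟨⟨hcfA, by decide⟩, by decide⟩, hcfM⟩
  have hcf2 : "capacity_factor_resource" ∉ A ++ ["Tech_efficiency"] ++ M := by
    simp only [List.mem_append, not_or]
    exact ⟨⟨hcfA, by decide⟩, hcfM⟩
  unfold pvSpliceA
  rw [show (A ++ "Tech_efficiency" :: M ++ "capacity_factor_resource" :: Z)
      = A ++ "Tech_efficiency" :: (M ++ "capacity_factor_resource" :: Z) from by simp]
  cases hc : keys.contains "Conversion_plus" <;> cases hs : keys.contains "Storage"
  · -- no conv, no storage
    simp [pvCList, pvSList]
  · -- no conv, storage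
    simp only [Bool.false_eq_true, if_false, if_true]
    rw [show A ++ "Tech_efficiency" :: (M ++ "capacity_factor_resource" :: Z)
        = (A ++ ["Tech_efficiency"] ++ M) ++ "capacity_factor_resource" :: Z from by simp]
    rw [pv_splice_one pvStorageSheets _ Z _ hcf2]
    simp [pvCList, pvSList]
  · -- conv, no storage
    simp only [Bool.false_eq_true, if_false, if_true]
    rw [pv_splice_one pvConvPlusSheets A (M ++ "capacity_factor_resource" :: Z) _ hteA]
    simp [pvCList, pvSList]
  · -- conv and storage
    simp only [if_true]
    rw [pv_splice_one pvConvPlusSheets A (M ++ "capacity_factor_resource" :: Z) _ hteA]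
    rw [show (A ++ "Tech_efficiency" :: pvConvPlusSheets) ++ (M ++ "capacity_factor_resource" :: Z)
        = (A ++ ["Tech_efficiency"] ++ pvConvPlusSheets ++ M) ++ "capacity_factor_resource" :: Z from by simp]
    rw [pv_splice_one pvStorageSheets _ Z _ hcf1]
    simp [pvCList, pvSList]

-- B's fold over a segment with no anchor just appends the segment
theorem pv_fold_plain (keys : List String) (names : List String)
    (h : ∀ n ∈ names, (n == "Tech_efficiency") = false ∧ (n == "capacity_factor_resource") = false) :
    ∀ row, names.foldl (pvStep keys) row = row ++ names := by
  induction names with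
  | nil => intro row; simp
  | cons x xs ih =>
    intro row
    have hx := h x (by simp)
    simp only [List.foldl_cons, pvStep, hx.1, hx.2, Bool.false_and, Bool.false_eq_true, if_false]
    rw [ih (fun n hn => h n (by simp [hn]))]
    simp

-- B's pass on the same split base
theorem pv_rowB_char (keys A M Z : List String)
    (hA : ∀ n ∈ A, (n == "Tech_efficiency") = false ∧ (n == "capacity_factor_resource") = false)
    (hM : ∀ n ∈ M, (n == "Tech_efficiency") = false ∧ (n == "capacity_factor_resource") = false)
    (hZ : ∀ n ∈ Z, (n == "Tech_efficiency") = false ∧ (n == "capacity_factor_resource") = false) :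
    pvRowB (A ++ "Tech_efficiency" :: M ++ "capacity_factor_resource" :: Z) keys
      = A ++ "Tech_efficiency" :: pvCList (keys.contains "Conversion_plus")
          ++ M ++ "capacity_factor_resource" :: pvSList (keys.contains "Storage") ++ Z := by
  rw [pvRowB_eq_foldl]
  have e : A ++ "Tech_efficiency" :: M ++ "capacity_factor_resource" :: Z
      = (((A ++ ["Tech_efficiency"]) ++ M) ++ ["capacity_factor_resource"]) ++ Z := by simp
  rw [e, List.foldl_append, List.foldl_append, List.foldl_append, List.foldl_append,
      pv_fold_plain keys A hA]
  cases hc : keys.contains "Conversion_plus" <;> cases hs : keys.contains "Storage" <;>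
    · rw [List.foldl_cons]
      simp only [pvStep, hc, hs]
      rw [pv_fold_plain keys M hM]
      rw [List.foldl_cons]
      simp only [pvStep, hc, hs]
      rw [pv_fold_plain keys Z hZ]
      simp [pvCList, pvSList]

theorem pv_key_op (keys : List String) : pvSpliceA pvOpBase keys = pvRowB pvOpBase keys := by
  have e : pvOpBase = pvAOp ++ "Tech_efficiency" :: pvMOp ++ "capacity_factor_resource" :: pvZOp := by
    simp [pvOpBase, pvAOp, pvMOp, pvZOp]
  rw [e, pv_splice_char keys pvAOp pvMOp pvZOp (by decide) (by decide) (by decide),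
      pv_rowB_char keys pvAOp pvMOp pvZOp (by decide) (by decide) (by decide)]

theorem pv_key_pl (keys : List String) : pvSpliceA pvPlBase keys = pvRowB pvPlBase keys := by
  have e : pvPlBase = pvAPl ++ "Tech_efficiency" :: pvMPl ++ "capacity_factor_resource" :: pvZPl := by
    simp [pvPlBase, pvAPl, pvMPl, pvZPl]
  rw [e, pv_splice_char keys pvAPl pvMPl pvZPl (by decide) (by decide) (by decide),
      pv_rowB_char keys pvAPl pvMPl pvZPl (by decide) (by decide) (by decide)]

-- ===== VERDICT (by name: the statement is the Claim_ definition above) =====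
theorem take_regional_sheets_spec : Claim_equal_take_regional_sheets := by
  intro mode technologies regions _ _
  unfold Spec_take_regional_sheets take_regional_sheets take_regional_sheets_alt
  by_cases hop : mode = "Operation"
  · subst hop
    simp only [beq_self_eq_true, if_true, show ("Operation" == "Planning") = false from rfl,
      Bool.false_eq_true, if_false]
    congr 2
    funext d reg
    cases technologies.lookup reg with
    | none => rfl
    | some t => simp [pv_key_op]
  · by_cases hpl : mode = "Planning"
    · subst hpl
      simp only [show ("Planning" == "Operation") = false from rfl, beq_self_eq_true,
        if_true, Bool.false_eq_true, if_false]
      congr 2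
      funext d reg
      cases technologies.lookup reg with
      | none => rfl
      | some t => simp [pv_key_pl]
    · have h1 : (mode == "Operation") = false := by simp [hop]
      have h2 : (mode == "Planning") = false := by simp [hpl]
      simp only [h1, h2, Bool.false_eq_true, if_false, or_self]
      have hfold : ∀ (l : List String) (d : PySem.Dict String (List String)),
          List.foldl (fun d _ => d) d l = d := by
        intro l
        induction l with
        | nil => intro d; rfl
        | cons x xs ih => intro d; exact ih d
      rw [hfold]
      rfl
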